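-- pv_equiv track=rewrite | github.com/inference-sim/sim2real | pipeline/lib/values.py | _detect_list_key
-- ===== SOURCE A (Python) =====
-- _LIST_KEY_CANDIDATES = ("name", "mountPath", "containerPort")
--
-- def _detect_list_key(base_list: list, overlay_list: list):
--     """Return the first candidate key present in ALL dicts in both lists, or None."""
--     all_items = base_list + overlay_list
--     if not all_items:
--         return None
--     for candidate in _LIST_KEY_CANDIDATES:
--         if all(candidate in d for d in all_items):
--             return candidate
--     return None
-- ===== SOURCE B (Python) =====
-- _LIST_KEY_CANDIDATES = ("name", "mountPath", "containerPort")
--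
-- def _detect_list_key(base_list: list, overlay_list: list):
--     """Return the first candidate key present in ALL dicts in both lists, or None."""
--     all_items = base_list + overlay_list
--     if not all_items:
--         return None
--     common = set(all_items[0]).intersection(*map(set, all_items[1:]))
--     return next((c for c in _LIST_KEY_CANDIDATES if c in common), None)
-- ===== Notes on version B (the rewrite author's own statement) =====
-- stated objective: alternative
-- what changed: Instead of A's per-candidate scan over all dicts (membership test of each candidate in every dict), B computes the key-set intersection of all dicts in one pass and then picks the first candidate in that intersection.
import Mathlib
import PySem

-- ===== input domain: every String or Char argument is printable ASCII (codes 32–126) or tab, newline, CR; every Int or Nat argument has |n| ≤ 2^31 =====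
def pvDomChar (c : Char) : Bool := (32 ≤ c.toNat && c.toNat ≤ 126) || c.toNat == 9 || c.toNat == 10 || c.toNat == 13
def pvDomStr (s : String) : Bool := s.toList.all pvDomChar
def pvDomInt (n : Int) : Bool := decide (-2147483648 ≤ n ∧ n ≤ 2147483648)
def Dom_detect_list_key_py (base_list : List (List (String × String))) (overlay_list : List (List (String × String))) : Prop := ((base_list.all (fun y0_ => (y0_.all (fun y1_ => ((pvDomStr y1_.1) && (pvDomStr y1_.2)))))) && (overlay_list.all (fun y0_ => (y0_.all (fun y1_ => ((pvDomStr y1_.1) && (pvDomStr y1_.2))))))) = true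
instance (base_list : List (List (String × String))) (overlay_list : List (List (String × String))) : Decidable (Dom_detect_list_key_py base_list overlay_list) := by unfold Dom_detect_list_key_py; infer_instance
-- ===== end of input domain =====

-- B replaces A's candidate-by-candidate scan over all dicts with one key-set
-- intersection pass followed by candidate lookups (alternative decomposition).

-- ===== PORT A =====
-- the 'for candidate in _LIST_KEY_CANDIDATES: if all(candidate in d for d in all_items): return candidate' loop
def pvCandLoopA (all_items : List (List (String × String))) : List String → Option String
  | [] => none
  | c :: cs =>
    if all_items.all (fun d => d.any (fun kv => kv.1 == c)) then some c
    else pvCandLoopA all_items cs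

def detect_list_key_py (base_list : List (List (String × String))) (overlay_list : List (List (String × String))) : Option String :=
  let all_items := base_list ++ overlay_list
  if all_items.isEmpty then none
  else pvCandLoopA all_items ["name", "mountPath", "containerPort"]

-- ===== PORT B =====
def detect_list_key_py_alt (base_list : List (List (String × String))) (overlay_list : List (List (String × String))) : Option String :=
  match base_list ++ overlay_list with
  | [] => none
  | d0 :: rest =>
    let common : PySem.Set String :=
      rest.foldl (fun s d => PySem.Set.inter s (PySem.Set.ofList (d.map Prod.fst)))
        (PySem.Set.ofList (d0.map Prod.fst))
    -- 'for candidate in _LIST_KEY_CANDIDATES: if candidate in common: return candidate'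
    ["name", "mountPath", "containerPort"].find? (fun c => PySem.Set.contains common c)

-- ===== PRECONDITION & SPEC =====
def Spec_detect_list_key_py (base_list : List (List (String × String))) (overlay_list : List (List (String × String))) (out : Option String) : Prop := out = detect_list_key_py_alt base_list overlay_list
instance (base_list : List (List (String × String))) (overlay_list : List (List (String × String))) (out : Option String) : Decidable (Spec_detect_list_key_py base_list overlay_list out) := by unfold Spec_detect_list_key_py; infer_instance

-- ===== CLAIM (what is proved, stated in full; the proofs are below) =====
def Claim_equal_detect_list_key_py : Prop := ∀ (base_list : List (List (String × String))) (overlay_list : List (List (String × String))), Dom_detect_list_key_py base_list overlay_list → Spec_detect_list_key_py base_list overlay_list (detect_list_key_py base_list overlay_list)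

-- ===== LEMMAS AND PROOFS =====

-- membership in the folded intersection = membership in the start set and in every dict's keys
theorem pv_mem_foldl_inter (rest : List (List (String × String))) (s : PySem.Set String) (c : String) :
    (c ∈ rest.foldl (fun s d => PySem.Set.inter s (PySem.Set.ofList (d.map Prod.fst))) s)
      ↔ c ∈ s ∧ ∀ d ∈ rest, c ∈ d.map Prod.fst := by
  induction rest generalizing s with
  | nil => simp
  | cons d rest ih =>
    simp [ih, PySem.Set.mem_inter, PySem.Set.mem_ofList]
    tauto

-- the candidate test of A equals the candidate test of B
theorem pv_pred_eq (d0 : List (String × String)) (rest : List (List (String × String))) (c : String) :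
    ((d0 :: rest).all fun d => d.any fun kv => kv.1 == c)
      = PySem.Set.contains
          (rest.foldl (fun s d => PySem.Set.inter s (PySem.Set.ofList (d.map Prod.fst)))
            (PySem.Set.ofList (d0.map Prod.fst))) c := by
  rw [Bool.eq_iff_iff, PySem.Set.contains_iff, pv_mem_foldl_inter, PySem.Set.mem_ofList]
  simp only [List.all_cons, Bool.and_eq_true, List.all_eq_true, List.any_eq_true, beq_iff_eq,
    List.mem_map]

-- A's candidate loop equals B's find? over the common key set, for any candidate list
theorem pv_loop_eq (d0 : List (String × String)) (rest : List (List (String × String)))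
    (cs : List String) :
    pvCandLoopA (d0 :: rest) cs
      = cs.find? (fun c => PySem.Set.contains
          (rest.foldl (fun s d => PySem.Set.inter s (PySem.Set.ofList (d.map Prod.fst)))
            (PySem.Set.ofList (d0.map Prod.fst))) c) := by
  induction cs with
  | nil => rfl
  | cons c cs ih =>
    rw [pvCandLoopA, List.find?_cons, pv_pred_eq, ih]
    cases h : PySem.Set.contains
        (rest.foldl (fun s d => PySem.Set.inter s (PySem.Set.ofList (d.map Prod.fst)))
          (PySem.Set.ofList (d0.map Prod.fst))) c <;> simp

-- ===== VERDICT (by name: the statement is the Claim_ definition above) =====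
theorem detect_list_key_py_spec : Claim_equal_detect_list_key_py := by
  intro base_list overlay_list _
  unfold Spec_detect_list_key_py detect_list_key_py detect_list_key_py_alt
  cases h : base_list ++ overlay_list with
  | nil => simp
  | cons d0 rest =>
    simp only [List.isEmpty_cons, Bool.false_eq_true, if_false]
    exact pv_loop_eq d0 rest _
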